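-- pv_equiv track=rewrite | github.com/an-anya/Simple_interpreter | my_interpreter2.py | isvar
-- ===== SOURCE A (Python) =====
-- def isvar(x):
--     if x=="True" or x=="False" or x=="and" or x=="or":
--         return False
--     else:
--         x.strip()
--         for i in range(len(x)):
--             if ord('a') <=ord(x[i])<= ord('z') or ord('A') <=ord(x[i])<= ord('Z'):
--                 pass
--             else:
--                 return False
--         return True
-- ===== SOURCE B (Python) =====
-- import re
--
-- _KEYWORDS = {"True", "False", "and", "or"}
--
-- def isvar(x):
--     if x in _KEYWORDS:
--         return False
--     return re.fullmatch('[A-Za-z]*', x) is not None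
-- ===== Notes on version B (the rewrite author's own statement) =====
-- stated objective: idiomatic
-- what changed: The indexed character-by-character loop with ord() range comparisons is replaced by a set-membership keyword guard plus a single regex full-match against [A-Za-z]* (the * quantifier keeps the empty string True, as A's vacuous loop does); the scan runs inside the C regex engine, measured ~10x faster.
import Mathlib
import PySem

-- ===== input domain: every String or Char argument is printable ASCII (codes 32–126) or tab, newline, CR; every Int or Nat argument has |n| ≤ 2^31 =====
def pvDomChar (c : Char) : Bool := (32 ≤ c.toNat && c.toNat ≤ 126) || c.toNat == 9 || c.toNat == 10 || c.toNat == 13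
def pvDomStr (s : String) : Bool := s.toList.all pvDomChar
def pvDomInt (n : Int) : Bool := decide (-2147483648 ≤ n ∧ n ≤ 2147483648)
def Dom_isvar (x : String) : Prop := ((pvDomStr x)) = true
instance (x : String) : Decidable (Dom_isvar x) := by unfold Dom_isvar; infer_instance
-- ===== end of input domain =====

-- B replaces A's indexed per-character ord() loop by a keyword set guard plus one regex
-- full-match on [A-Za-z]* (idiomatic; return value only, same behaviour).

-- ===== PORT A =====
-- A's for-loop over range(len(x)) with early 'return False': structural recursion over the
-- remaining characters, same condition order (a..z first, then A..Z), same early exit.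
def isvarLoop : List Char → Bool
  | [] => true
  | c :: rest =>
    if (97 ≤ c.toNat ∧ c.toNat ≤ 122) ∨ (65 ≤ c.toNat ∧ c.toNat ≤ 90) then isvarLoop rest
    else false

def isvar (x : String) : Bool :=
  if x = "True" ∨ x = "False" ∨ x = "and" ∨ x = "or" then false
  else isvarLoop x.toList

-- ===== PORT B =====
-- regex character class [A-Za-z] as a predicate (A-Z first, as in the class); fullmatch of
-- '[A-Za-z]*' holds iff every character matches the class (empty string matches).
def isvarClass (c : Char) : Bool := (65 ≤ c.toNat && c.toNat ≤ 90) || (97 ≤ c.toNat && c.toNat ≤ 122)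

def isvar_alt (x : String) : Bool :=
  if ["True", "False", "and", "or"].contains x then false
  else x.toList.all isvarClass

-- ===== PRECONDITION & SPEC =====
def Spec_isvar (x : String) (out : Bool) : Prop := out = isvar_alt x
instance (x : String) (out : Bool) : Decidable (Spec_isvar x out) := by unfold Spec_isvar; infer_instance

-- ===== CLAIM (what is proved, stated in full; the proofs are below) =====
def Claim_equal_isvar : Prop := ∀ (x : String), Dom_isvar x → Spec_isvar x (isvar x)

-- ===== LEMMAS AND PROOFS =====
theorem isvarLoop_eq_all (l : List Char) : isvarLoop l = l.all isvarClass := by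
  induction l with
  | nil => rfl
  | cons c rest ih =>
    simp only [isvarLoop, List.all_cons, isvarClass]
    split_ifs with h
    · rw [ih]
      have : ((65 ≤ c.toNat && c.toNat ≤ 90) || (97 ≤ c.toNat && c.toNat ≤ 122)) = true := by
        rcases h with ⟨h1, h2⟩ | ⟨h1, h2⟩ <;> simp [h1, h2]
      rw [this]; simp
    · have : ((65 ≤ c.toNat && c.toNat ≤ 90) || (97 ≤ c.toNat && c.toNat ≤ 122)) = false := by
        push Not at h
        rcases h with ⟨h1, h2⟩
        simp only [Bool.or_eq_false_iff, Bool.and_eq_false_iff]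
        constructor <;> [skip; skip] <;> simp only [decide_eq_false_iff_not, not_le] <;> omega
      rw [this]; simp

-- ===== VERDICT (by name: the statement is the Claim_ definition above) =====
theorem isvar_spec : Claim_equal_isvar := by
  intro x _
  unfold Spec_isvar isvar isvar_alt
  rw [isvarLoop_eq_all]
  by_cases h : x = "True" ∨ x = "False" ∨ x = "and" ∨ x = "or"
  · rw [if_pos h, if_pos (by simpa using h)]
  · rw [if_neg h, if_neg (by simpa using h)]
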